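-- pv_equiv track=rewrite | github.com/josebraz/Python-Teaching | finish/2048.py | left_action
-- ===== SOURCE A (Python) =====
-- items = 4
--
-- EMPTY_VALUE = -1
--
-- def left_action(values):
--     any_change = False
--     for y in range(items):
--         combine = -1
--         for x in range(items-1, 0, -1):
--             if values[y][x] != EMPTY_VALUE:
--                 if values[y][x] == values[y][x-1] and combine != x:
--                     combine = x-1
--                     values[y][x-1] *= 2
--                     values[y][x] = EMPTY_VALUE
--                     any_change = True
--                 elif values[y][x-1] == EMPTY_VALUE:
--                     values[y][x-1] = values[y][x]
--                     values[y][x] = EMPTY_VALUE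
--                     any_change = True
--             if x < items-1 and values[y][x] == EMPTY_VALUE and values[y][x+1] != EMPTY_VALUE:
--                 values[y][x] = values[y][x+1]
--                 values[y][x+1] = EMPTY_VALUE
--                 any_change = True
--     return any_change
-- ===== SOURCE B (Python) =====
-- # B: per-row full left slide (collect tiles, merge equal neighbours from the
-- # right, pad with EMPTY_VALUE), any_change = "some row is not already slid".
-- # NOTE: A mutates `values` by a single right-to-left pass (gaps can remain);
-- # B writes the fully slid row back in place instead -- the equivalence claimed
-- # and proved is about the RETURN value only.
-- items = 4
--
-- EMPTY_VALUE = -1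
--
-- def _slide_row(row):
--     tiles = [v for v in row if v != EMPTY_VALUE]
--     rev = tiles[::-1]
--     merged_rev = []
--     i = 0
--     while i < len(rev):
--         if i + 1 < len(rev) and rev[i] == rev[i + 1]:
--             merged_rev.append(rev[i] * 2)
--             i += 2
--         else:
--             merged_rev.append(rev[i])
--             i += 1
--     merged = merged_rev[::-1]
--     return merged + [EMPTY_VALUE] * (items - len(merged))
--
-- def left_action(values):
--     any_change = False
--     for y in range(items):
--         row = values[y][:items]
--         new_row = _slide_row(row)
--         if new_row != row:
--             values[y][:items] = new_row
--             any_change = True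
--     return any_change
-- ===== Notes on version B (the rewrite author's own statement) =====
-- stated objective: simpler
-- what changed: A does one in-place right-to-left pass per row with a 'combine' guard and three entangled mutation branches; B rebuilds each row functionally (filter out empties, merge equal neighbours scanning from the right, pad) and reports change as new_row != row; the return-value equivalence is what is proved (A's in-place pass can leave gaps, so the mutated grids differ).
import Mathlib
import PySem

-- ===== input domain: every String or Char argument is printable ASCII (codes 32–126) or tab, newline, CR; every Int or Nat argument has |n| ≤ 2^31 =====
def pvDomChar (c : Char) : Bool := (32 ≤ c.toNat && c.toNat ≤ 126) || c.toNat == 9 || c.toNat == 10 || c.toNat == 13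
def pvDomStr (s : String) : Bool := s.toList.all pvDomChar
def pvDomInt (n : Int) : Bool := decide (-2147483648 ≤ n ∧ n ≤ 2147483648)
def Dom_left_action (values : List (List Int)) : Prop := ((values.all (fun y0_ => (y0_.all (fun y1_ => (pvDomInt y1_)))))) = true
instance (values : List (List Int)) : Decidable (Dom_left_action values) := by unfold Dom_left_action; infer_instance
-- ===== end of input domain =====

-- B changes the per-row algorithm (functional rebuild: filter, merge from the right, pad;
-- change = new_row ≠ row) instead of A's three-branch in-place pass; the equivalence
-- proved is about the RETURN value only (A and B leave the mutated grid in different states).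

-- ===== PORT A =====
-- Under Pre_ all indices read/written are in range, so getD / List.set are exact
-- transliterations of values[y][x] reads and assignments.
def innerStepA (s : List Int × Int × Bool) (x : Nat) : List Int × Int × Bool :=
  let r := s.1; let combine := s.2.1; let ch := s.2.2
  let s1 : List Int × Int × Bool :=
    if r.getD x 0 ≠ -1 then
      if r.getD x 0 = r.getD (x-1) 0 ∧ combine ≠ (x : Int) then
        ((r.set (x-1) (r.getD (x-1) 0 * 2)).set x (-1), (x : Int) - 1, true)
      else if r.getD (x-1) 0 = -1 then
        ((r.set (x-1) (r.getD x 0)).set x (-1), combine, true)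
      else (r, combine, ch)
    else (r, combine, ch)
  let r1 := s1.1
  if x < 3 ∧ r1.getD x 0 = -1 ∧ r1.getD (x+1) 0 ≠ -1 then
    ((r1.set x (r1.getD (x+1) 0)).set (x+1) (-1), s1.2.1, true)
  else s1

def left_action (values : List (List Int)) : Bool :=
  ((List.range 4).foldl (fun st y =>
    let res := [3, 2, 1].foldl innerStepA (st.1.getD y [], -1, st.2)
    (st.1.set y res.1, res.2.2)) (values, false)).2

-- ===== PORT B =====
def mergeRevB : List Int → List Int
  | [] => []
  | [a] => [a]
  | a :: b :: rest => if a = b then (a * 2) :: mergeRevB rest else a :: mergeRevB (b :: rest)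

def slideRowB (row : List Int) : List Int :=
  let tiles := row.filter (fun v => v ≠ -1)
  let merged := (mergeRevB tiles.reverse).reverse
  merged ++ List.replicate (4 - merged.length) (-1)

def left_action_alt (values : List (List Int)) : Bool :=
  (List.range 4).foldl (fun anyc y =>
    let row := (values.getD y []).take 4
    if slideRowB row ≠ row then true else anyc) false

-- ===== PRECONDITION & SPEC =====
-- Pre_: exactly the grids on which A returns (A indexes values[y][x] for all y < 4, x < 4,
-- raising IndexError on grids with fewer than 4 rows or a short row among the first 4).
def Pre_left_action (values : List (List Int)) : Prop :=
  4 ≤ values.length ∧ ∀ r ∈ values.take 4, 4 ≤ r.length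
instance (values : List (List Int)) : Decidable (Pre_left_action values) := by
  unfold Pre_left_action; infer_instance

def pvWitness_left_action : List (List Int) :=
  [[2, 2, -1, 4], [-1, -1, -1, -1], [4, -1, 4, 2], [2, 4, 8, 16]]

def Spec_left_action (values : List (List Int)) (out : Bool) : Prop := out = left_action_alt values
instance (values : List (List Int)) (out : Bool) : Decidable (Spec_left_action values out) := by unfold Spec_left_action; infer_instance

-- ===== CLAIM (what is proved, stated in full; the proofs are below) =====
def Claim_equal_left_action : Prop := ∀ (values : List (List Int)), Dom_left_action values → Pre_left_action values → Spec_left_action values (left_action values)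

-- ===== LEMMAS AND PROOFS =====
-- rowStable: the row is already slid (left-packed, no adjacent equal pair of tiles);
-- both programs report change exactly on non-stable rows.
def rowStable (a b c d : Int) : Bool :=
  (d == -1 || (d != c && c != -1)) && (c == -1 || (c != b && b != -1)) && (b == -1 || (b != a && a != -1))

lemma step_flag_mono (s : List Int × Int × Bool) (x : Nat) (h : s.2.2 = true) :
    (innerStepA s x).2.2 = true := by
  simp only [innerStepA]; split_ifs <;> simp_all

lemma step_fire (r : List Int) (comb : Int) (ch : Bool) (x : Nat)
    (h1 : r.getD x 0 ≠ -1)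
    (h2 : (r.getD x 0 = r.getD (x-1) 0 ∧ comb ≠ (x : Int)) ∨ r.getD (x-1) 0 = -1) :
    (innerStepA (r, comb, ch) x).2.2 = true := by
  simp only [innerStepA]; split_ifs <;> simp_all

lemma step_nofire (r : List Int) (comb : Int) (ch : Bool) (x : Nat)
    (h1 : r.getD x 0 = -1 ∨ (¬(r.getD x 0 = r.getD (x-1) 0 ∧ comb ≠ (x : Int)) ∧ r.getD (x-1) 0 ≠ -1))
    (h2 : ¬(x < 3 ∧ r.getD x 0 = -1 ∧ r.getD (x+1) 0 ≠ -1)) :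
    innerStepA (r, comb, ch) x = (r, comb, ch) := by
  simp only [innerStepA]; split_ifs <;> simp_all

lemma passA (a b c d : Int) (rest : List Int) (ch : Bool) :
    ([3, 2, 1].foldl innerStepA (a :: b :: c :: d :: rest, -1, ch)).2.2
      = (ch || !rowStable a b c d) := by
  have g1 : (a :: b :: c :: d :: rest).getD 1 0 = b := rfl
  have g2 : (a :: b :: c :: d :: rest).getD 2 0 = c := rfl
  have g3 : (a :: b :: c :: d :: rest).getD 3 0 = d := rfl
  have g0 : (a :: b :: c :: d :: rest).getD 0 0 = a := rfl
  simp only [List.foldl_cons, List.foldl_nil]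
  by_cases f3 : d ≠ -1 ∧ (d = c ∨ c = -1)
  · rw [step_flag_mono _ 1 (step_flag_mono _ 2 (step_fire _ (-1) ch 3
      (by rw [g3]; exact f3.1)
      (by rw [g3, g2]
          rcases f3.2 with h | h
          · exact Or.inl ⟨h, by decide⟩
          · exact Or.inr h)))]
    have hs : rowStable a b c d = false := by
      simp only [rowStable]; rcases f3 with ⟨h1, h2 | h2⟩ <;> simp_all
    simp [hs]
  · push_neg at f3
    have e3 : innerStepA (a :: b :: c :: d :: rest, -1, ch) 3 = (a :: b :: c :: d :: rest, -1, ch) := by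
      apply step_nofire
      · rw [g3, g2]
        by_cases hd : d = -1
        · exact Or.inl hd
        · exact Or.inr ⟨fun hh => (f3 hd).1 hh.1, (f3 hd).2⟩
      · simp
    rw [e3]
    by_cases f2 : c ≠ -1 ∧ (c = b ∨ b = -1)
    · rw [step_flag_mono _ 1 (step_fire _ (-1) ch 2
        (by rw [g2]; exact f2.1)
        (by rw [g2, g1]
            rcases f2.2 with h | h
            · exact Or.inl ⟨h, by decide⟩
            · exact Or.inr h))]
      have hs : rowStable a b c d = false := by
        simp only [rowStable]; rcases f2 with ⟨h1, h2 | h2⟩ <;> simp_all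
      simp [hs]
    · push_neg at f2
      have e2 : innerStepA (a :: b :: c :: d :: rest, -1, ch) 2 = (a :: b :: c :: d :: rest, -1, ch) := by
        apply step_nofire
        · rw [g2, g1]
          by_cases hc : c = -1
          · exact Or.inl hc
          · exact Or.inr ⟨fun hh => (f2 hc).1 hh.1, (f2 hc).2⟩
        · rw [show (2:Nat)+1 = 3 from rfl, g2, g3]
          rintro ⟨-, hc, hd⟩
          exact (f3 hd).2 hc
      rw [e2]
      by_cases f1 : b ≠ -1 ∧ (b = a ∨ a = -1)
      · rw [step_fire _ (-1) ch 1
          (by rw [g1]; exact f1.1)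
          (by rw [g1, g0]
              rcases f1.2 with h | h
              · exact Or.inl ⟨h, by decide⟩
              · exact Or.inr h)]
        have hs : rowStable a b c d = false := by
          simp only [rowStable]; rcases f1 with ⟨h1, h2 | h2⟩ <;> simp_all
        simp [hs]
      · push_neg at f1
        have e1 : innerStepA (a :: b :: c :: d :: rest, -1, ch) 1 = (a :: b :: c :: d :: rest, -1, ch) := by
          apply step_nofire
          · rw [g1, g0]
            by_cases hb : b = -1
            · exact Or.inl hb
            · exact Or.inr ⟨fun hh => (f1 hb).1 hh.1, (f1 hb).2⟩
          · rw [show (1:Nat)+1 = 2 from rfl, g1, g2]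
            rintro ⟨-, hb, hc⟩
            exact (f2 hc).2 hb
        rw [e1]
        have hs : rowStable a b c d = true := by
          simp only [rowStable]
          by_cases hd : d = -1 <;> by_cases hc : c = -1 <;> by_cases hb : b = -1 <;>
            simp_all <;> simp_all [f3 hd, f2 hc, f1 hb]
        simp [hs]

set_option maxHeartbeats 2000000 in
set_option maxRecDepth 8000 in
lemma passB (a b c d : Int) :
    decide (slideRowB [a, b, c, d] ≠ [a, b, c, d]) = !rowStable a b c d := by
  by_cases h1 : d = -1 <;> by_cases h2 : d = c <;> by_cases h3 : c = -1 <;>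
    by_cases h4 : c = b <;> by_cases h5 : b = -1 <;> by_cases h6 : b = a <;>
    by_cases h7 : a = -1 <;>
    simp_all [slideRowB, mergeRevB, rowStable, List.filter] <;>
    (try omega) <;>
    (try (split_ifs <;> simp_all <;> try omega)) <;>
    (try (rw [Bool.eq_iff_iff]; simp only [Bool.or_eq_true, Bool.and_eq_true, Bool.not_eq_true', Bool.not_eq_eq_eq_not, Bool.not_true, decide_eq_true_eq, decide_eq_false_iff_not, beq_iff_eq, beq_eq_false_iff_ne, bne_iff_ne]; omega))

lemma passA' (a b c d : Int) (rest : List Int) (ch : Bool) :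
    (innerStepA (innerStepA (innerStepA (a :: b :: c :: d :: rest, -1, ch) 3) 2) 1).2.2
      = (ch || !rowStable a b c d) := passA a b c d rest ch

lemma if_flag (P : Prop) [Decidable P] (b : Bool) : (if P then true else b) = (b || decide P) := by
  split_ifs <;> simp_all

theorem main_eq (values : List (List Int)) (hpre : Pre_left_action values) :
    left_action values = left_action_alt values := by
  obtain ⟨hlen, hrows⟩ := hpre
  rcases values with _ | ⟨r0, _ | ⟨r1, _ | ⟨r2, _ | ⟨r3, vrest⟩⟩⟩⟩ <;> simp at hlen
  have h0 : 4 ≤ r0.length := hrows r0 (by simp)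
  have h1 : 4 ≤ r1.length := hrows r1 (by simp)
  have h2 : 4 ≤ r2.length := hrows r2 (by simp)
  have h3 : 4 ≤ r3.length := hrows r3 (by simp)
  rcases r0 with _ | ⟨a0, _ | ⟨b0, _ | ⟨c0, _ | ⟨d0, t0⟩⟩⟩⟩ <;> simp at h0
  rcases r1 with _ | ⟨a1, _ | ⟨b1, _ | ⟨c1, _ | ⟨d1, t1⟩⟩⟩⟩ <;> simp at h1
  rcases r2 with _ | ⟨a2, _ | ⟨b2, _ | ⟨c2, _ | ⟨d2, t2⟩⟩⟩⟩ <;> simp at h2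
  rcases r3 with _ | ⟨a3, _ | ⟨b3, _ | ⟨c3, _ | ⟨d3, t3⟩⟩⟩⟩ <;> simp at h3
  simp only [left_action, left_action_alt,
    show List.range 4 = [0, 1, 2, 3] from rfl,
    List.foldl_cons, List.foldl_nil,
    List.getD_cons_zero, List.getD_cons_succ, List.set_cons_zero, List.set_cons_succ,
    List.take_succ_cons, List.take_zero,
    if_flag, passA', passB]

-- ===== VERDICT (by name: the statement is the Claim_ definition above) =====
theorem left_action_spec : Claim_equal_left_action := by
  intro values _ hpre
  exact main_eq values hpre
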